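-- pv_equiv track=rewrite | github.com/PratikD7/CS-6140-Machine-Learning | Assignment 3/Task2.4.3- Part2.py | get_word_freq_dict
-- ===== SOURCE A (Python) =====
-- def list_to_dict(word, freq):
--     dct = dict()
--     index = 0
--
--     for item in word:
--         if item in dct:
--             dct[item] = dct[item] + freq[index]
--         else:
--             dct[item] = freq[index]
--         index += 1
--
--     return dct
--
-- def get_word_freq_dict(data):
--     word_id_list = []
--     freq_list = []
--
--     for row in data:
--         word_id_list.append(row[1])
--         freq_list.append(row[2])
--     word_freq_dict = list_to_dict(word_id_list, freq_list)
--
--     return word_freq_dict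
-- ===== SOURCE B (Python) =====
-- def get_word_freq_dict(data):
--     keys = []
--     for row in data:
--         if row[1] not in keys:
--             keys.append(row[1])
--     return {k: sum(row[2] for row in data if row[1] == k) for k in keys}
-- ===== Notes on version B (the rewrite author's own statement) =====
-- stated objective: alternative
-- what changed: Group-by-key in two phases: collect the distinct word ids in first-occurrence order, then build the dict with a comprehension that sums each id's frequencies by a fresh filtered scan of data, instead of A's single accumulation pass over two parallel lists walked by an index-carrying helper.
import Mathlib
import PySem

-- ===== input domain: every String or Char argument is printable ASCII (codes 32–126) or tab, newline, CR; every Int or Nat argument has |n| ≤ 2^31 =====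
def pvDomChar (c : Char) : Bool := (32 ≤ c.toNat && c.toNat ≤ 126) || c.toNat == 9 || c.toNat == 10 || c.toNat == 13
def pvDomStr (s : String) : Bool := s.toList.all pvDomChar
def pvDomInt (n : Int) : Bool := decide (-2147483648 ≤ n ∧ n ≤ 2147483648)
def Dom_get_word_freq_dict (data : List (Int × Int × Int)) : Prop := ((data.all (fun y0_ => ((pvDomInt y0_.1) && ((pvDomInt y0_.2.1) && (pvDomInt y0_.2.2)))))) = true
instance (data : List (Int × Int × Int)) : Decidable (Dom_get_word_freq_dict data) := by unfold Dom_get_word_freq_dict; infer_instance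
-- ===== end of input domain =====

-- B groups by key in two phases (distinct ids in first-occurrence order, then one filtered
-- summing scan of data per id) instead of A's single accumulation pass over two parallel
-- lists walked by an index-carrying helper; objective: alternative (not faster).

-- ===== PORT A =====
-- loop of list_to_dict: 'for item in word: … ; index += 1'; freq[index] is read with
-- PySem.List.pyGet? (.getD 0 can never fire at A's call site, where freq is as long as word,
-- so the port is exact there)
def list_to_dict_go (freq : List Int) : List Int → Nat → PySem.Dict Int Int → PySem.Dict Int Int
  | [], _, dct => dct
  | item :: rest, index, dct =>
      let fi := (PySem.List.pyGet? freq (index : Int)).getD 0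
      let dct' := if dct.contains item then dct.insert item (dct.getD item 0 + fi)
                  else dct.insert item fi
      list_to_dict_go freq rest (index + 1) dct'

def list_to_dict (word : List Int) (freq : List Int) : PySem.Dict Int Int :=
  list_to_dict_go freq word 0 PySem.Dict.empty

def get_word_freq_dict (data : List (Int × Int × Int)) : List (Int × Int) :=
  let lists := data.foldl (fun (acc : List Int × List Int) row =>
    (acc.1 ++ [row.2.1], acc.2 ++ [row.2.2])) ([], [])
  (list_to_dict lists.1 lists.2).items

-- ===== PORT B =====
-- 'keys' is a list kept duplicate-free in first-occurrence order ('if row[1] not in keys: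
-- keys.append'), which is exactly PySem.Set.add; the dict comprehension is a fold of inserts
-- over keys, each value being sum(row[2] for row in data if row[1] == k).
def get_word_freq_dict_alt (data : List (Int × Int × Int)) : List (Int × Int) :=
  let keys := data.foldl (fun ks row => PySem.Set.add ks row.2.1) PySem.Set.empty
  (keys.foldl (fun (d : PySem.Dict Int Int) k =>
      d.insert k (data.foldl (fun s row => if row.2.1 == k then s + row.2.2 else s) 0))
    PySem.Dict.empty).items

-- ===== PRECONDITION & SPEC =====
def Spec_get_word_freq_dict (data : List (Int × Int × Int)) (out : List (Int × Int)) : Prop := out = get_word_freq_dict_alt data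
instance (data : List (Int × Int × Int)) (out : List (Int × Int)) : Decidable (Spec_get_word_freq_dict data out) := by unfold Spec_get_word_freq_dict; infer_instance

-- ===== CLAIM (what is proved, stated in full; the proofs are below) =====
def Claim_equal_get_word_freq_dict : Prop := ∀ (data : List (Int × Int × Int)), Dom_get_word_freq_dict data → Spec_get_word_freq_dict data (get_word_freq_dict data)

-- ===== LEMMAS AND PROOFS =====

-- A's first loop builds exactly the two projection lists
theorem pv_build_lists (data : List (Int × Int × Int)) (w f : List Int) :
    data.foldl (fun (acc : List Int × List Int) row =>
      (acc.1 ++ [row.2.1], acc.2 ++ [row.2.2])) (w, f)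
    = (w ++ data.map (·.2.1), f ++ data.map (·.2.2)) := by
  induction data generalizing w f with
  | nil => simp
  | cons r rest ih => simp [List.foldl, ih]

-- the index walk over aligned lists is the fold over their zip
theorem pv_go_zip (w fw pre : List Int) (d : PySem.Dict Int Int)
    (h : fw.length = w.length) :
    list_to_dict_go (pre ++ fw) w pre.length d
    = (w.zip fw).foldl (fun d p =>
        if d.contains p.1 then d.insert p.1 (d.getD p.1 0 + p.2)
        else d.insert p.1 p.2) d := by
  induction w generalizing fw pre d with
  | nil => cases fw <;> simp_all [list_to_dict_go]
  | cons a w' ih =>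
    cases fw with
    | nil => simp at h
    | cons b fw' =>
      simp only [list_to_dict_go]
      have hget : PySem.List.pyGet? (pre ++ b :: fw') ((pre.length : Nat) : Int) = some b := by
        rw [PySem.List.pyGet?_natCast]
        simp
      rw [hget]
      have h' : fw'.length = w'.length := by simpa using h
      have := ih fw' (pre ++ [b]) ?_ h'
      · simpa [List.append_assoc] using this

-- A's branching per-element step is plain insert-accumulate on every dict
theorem pv_step_eq (d : PySem.Dict Int Int) (k v : Int) :
    (if d.contains k then d.insert k (d.getD k 0 + v) else d.insert k v)
    = d.insert k (d.getD k 0 + v) := by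
  by_cases h : d.contains k = true
  · simp [h]
  · have h0 : d.getD k 0 = 0 :=
      PySem.Dict.getD_of_not_contains d 0 (by simpa using h)
    simp [h, h0]

-- B's filtered sum started from s is s plus the sum started from 0
theorem pv_sum_shift (data : List (Int × Int × Int)) (k : Int) (s : Int) :
    data.foldl (fun s row => if row.2.1 == k then s + row.2.2 else s) s
    = s + data.foldl (fun s row => if row.2.1 == k then s + row.2.2 else s) 0 := by
  induction data generalizing s with
  | nil => simp
  | cons r rest ih =>
    simp only [List.foldl]
    rw [ih (if (r.2.1 == k) = true then s + r.2.2 else s),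
        ih (if (r.2.1 == k) = true then 0 + r.2.2 else 0)]
    split_ifs <;> ring

-- every lookup in A's accumulating fold is B's filtered sum
theorem pv_getD_fold (data : List (Int × Int × Int)) (d : PySem.Dict Int Int) (k : Int) :
    (data.foldl (fun (d : PySem.Dict Int Int) row =>
        d.insert row.2.1 (d.getD row.2.1 0 + row.2.2)) d).getD k 0
    = d.getD k 0 + data.foldl (fun s row => if row.2.1 == k then s + row.2.2 else s) 0 := by
  induction data generalizing d with
  | nil => simp
  | cons r rest ih =>
    simp only [List.foldl]
    rw [ih]
    by_cases h : k = r.2.1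
    · subst h
      rw [PySem.Dict.getD_insert_self]
      have hs := pv_sum_shift rest r.2.1 (if (r.2.1 == r.2.1) = true then 0 + r.2.2 else 0)
      simp only [beq_self_eq_true, if_true] at hs ⊢
      rw [hs]; ring
    · rw [PySem.Dict.getD_insert, if_neg h]
      have hb : (r.2.1 == k) = false := by
        simp only [beq_eq_false_iff_ne]; exact fun hh => h hh.symm
      rw [hb]; simp

-- ===== VERDICT (by name: the statement is the Claim_ definition above) =====
theorem get_word_freq_dict_spec : Claim_equal_get_word_freq_dict := by
  intro data _
  unfold Spec_get_word_freq_dict get_word_freq_dict get_word_freq_dict_alt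
  -- reduce A to the single insert-accumulate fold over data
  have hb := pv_build_lists data [] []
  simp only [List.nil_append] at hb
  show (list_to_dict (data.foldl _ ([], [])).1 (data.foldl _ ([], [])).2).items = _
  rw [hb]
  unfold list_to_dict
  have hz := pv_go_zip (data.map (·.2.1)) (data.map (·.2.2)) [] PySem.Dict.empty (by simp)
  simp only [List.nil_append, List.length_nil] at hz
  rw [hz, List.zip_map', List.foldl_map]
  simp only [pv_step_eq]
  -- names for A's dict and B's key list
  set DA := data.foldl (fun (d : PySem.Dict Int Int) row =>
      d.insert row.2.1 (d.getD row.2.1 0 + row.2.2)) PySem.Dict.empty with hDA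
  set keys := data.foldl (fun ks row => PySem.Set.add ks row.2.1) PySem.Set.empty with hkeys
  -- B's keys list is the first-occurrence dedup of data's ids = A's dict's keys
  have hkeysA : DA.keys = keys := by
    rw [hDA, PySem.Dict.keys_foldl_insert_key, hkeys,
        ← PySem.Set.update_map_eq_foldl_add]
    rfl
  have hnodup : DA.keys.Nodup := by
    rw [hDA]; exact PySem.Dict.nodup_keys_foldl_insert_key _ _ _ _ PySem.Dict.nodup_keys_empty
  have hknodup : keys.Nodup := hkeysA ▸ hnodup
  -- A's items = keys paired with lookups = keys paired with filtered sums = B's items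
  rw [PySem.Dict.items_eq_map_keys DA hnodup 0, hkeysA]
  rw [PySem.Dict.items_foldl_insert_fresh _ _ _ _
        (fun a _ => PySem.Dict.contains_empty a) (by simpa using hknodup)]
  simp only [PySem.Dict.empty, List.nil_append]
  refine List.map_congr_left (fun k hk => ?_)
  rw [hDA, pv_getD_fold]
  simp
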